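-- pv_equiv track=rewrite | github.com/ranjitodedra/research-helper | archive/NetworkGenerator/network_generator.py | _check_connectivity
-- ===== SOURCE A (Python) =====
-- from typing import Dict, List, Tuple, Set, Optional
-- from collections import deque
--
-- def _check_connectivity(edges: Dict[int, List[int]], n_nodes: int) -> bool:
--     """
--     Check if all nodes are reachable from depot using BFS.
--
--     Args:
--         edges: Edge dictionary
--         n_nodes: Total number of nodes
--
--     Returns:
--         True if graph is fully connected
--     """
--     visited = set()
--     queue = deque([0])  # Start from depot
--     visited.add(0)
--
--     while queue:
--         node = queue.popleft()
--         for neighbor in edges[node]: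
--             if neighbor not in visited:
--                 visited.add(neighbor)
--                 queue.append(neighbor)
--
--     return len(visited) == n_nodes
-- ===== SOURCE B (Python) =====
-- from typing import Dict, List
--
-- def _check_connectivity(edges: Dict[int, List[int]], n_nodes: int) -> bool:
--     # Recursive depth-first search over the graph structure: a shared visited
--     # set and an inner helper that recurses into each unseen neighbour,
--     # replacing A's explicit FIFO queue with recursion (DFS order).
--     visited = {0}
--
--     def dfs(node: int) -> None:
--         for nb in edges[node]:
--             if nb not in visited:
--                 visited.add(nb)
--                 dfs(nb)
--
--     dfs(0)
--     return len(visited) == n_nodes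
-- ===== Notes on version B (the rewrite author's own statement) =====
-- stated objective: alternative
-- what changed: Replaces A's iterative breadth-first search (FIFO deque worklist) by a recursive depth-first search: an inner helper recurses into each not-yet-visited neighbour with a shared visited set, so no queue is maintained and nodes are visited in DFS instead of BFS order; the reachable set is proved identical. Pre_ admits exactly the inputs where A returns (every node reachable from 0 is a key, stated as an n-step closure), minus assoc lists with duplicate keys, which no Python dict can represent.
import Mathlib
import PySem

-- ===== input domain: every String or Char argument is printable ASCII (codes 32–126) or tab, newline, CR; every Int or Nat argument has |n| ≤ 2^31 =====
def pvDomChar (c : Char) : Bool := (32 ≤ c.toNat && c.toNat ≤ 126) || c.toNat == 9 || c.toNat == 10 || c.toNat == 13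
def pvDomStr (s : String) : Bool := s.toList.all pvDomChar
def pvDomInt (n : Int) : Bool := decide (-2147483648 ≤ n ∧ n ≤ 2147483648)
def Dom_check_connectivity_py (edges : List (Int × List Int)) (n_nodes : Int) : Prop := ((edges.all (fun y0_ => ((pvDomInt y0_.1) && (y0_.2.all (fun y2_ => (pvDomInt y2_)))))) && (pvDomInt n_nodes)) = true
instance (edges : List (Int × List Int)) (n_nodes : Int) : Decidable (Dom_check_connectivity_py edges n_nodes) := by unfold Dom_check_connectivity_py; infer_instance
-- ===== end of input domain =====

-- B replaces A's iterative BFS (FIFO queue) by a recursive DFS with a shared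
-- visited set; objective: alternative algorithm, same reachable set, no speed
-- claim.

-- ===== PORT A =====
-- edges[node]: first-match association-list lookup; total form is exact under
-- Pre_ (node is always a present key there; Python raises KeyError otherwise).
def pvLookup (edges : List (Int × List Int)) (node : Int) : List Int :=
  ((edges.find? (fun p => p.1 == node)).map Prod.snd).getD []

-- fuel bounding the number of loop iterations (pops never exceed 1 + total
-- number of listed neighbours); the while-loop itself has no Python-side bound.
def pvFuel (edges : List (Int × List Int)) : Nat :=
  (edges.flatMap (fun p => p.2)).length + 1

-- body of `for neighbor in edges[node]: if neighbor not in visited: …`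
def pvBfsStep (s : List Int × List Int) (nbrs : List Int) : List Int × List Int :=
  nbrs.foldl (fun s nb =>
    if PySem.Set.contains s.1 nb then s else (PySem.Set.add s.1 nb, s.2 ++ [nb])) s

-- `while queue: node = queue.popleft(); …`
def pvBfsGo (edges : List (Int × List Int)) : Nat → List Int → List Int → List Int
  | 0, vis, _ => vis
  | _+1, vis, [] => vis
  | fuel+1, vis, node :: q =>
      let s := pvBfsStep (vis, q) (pvLookup edges node)
      pvBfsGo edges fuel s.1 s.2

def check_connectivity_py (edges : List (Int × List Int)) (n_nodes : Int) : Bool :=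
  let visited : List Int := PySem.Set.add PySem.Set.empty 0
  let visited := pvBfsGo edges (pvFuel edges) visited [0]
  decide ((visited.length : Int) = n_nodes)

-- ===== PORT B =====
-- the recursive helper `def dfs(node): for nb in edges[node]: if nb not in
-- visited: visited.add(nb); dfs(nb)` — the shared mutable `visited` set is
-- threaded through the fold; fuel bounds the recursion depth (each nested call
-- follows one freshly added node, so depth never exceeds pvFuel)
def pvDfs (edges : List (Int × List Int)) : Nat → List Int → Int → List Int
  | 0, vis, _ => vis
  | fuel+1, vis, node =>
      (pvLookup edges node).foldl
        (fun vis nb =>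
          if PySem.Set.contains vis nb then vis
          else pvDfs edges fuel (PySem.Set.add vis nb) nb) vis

def check_connectivity_py_alt (edges : List (Int × List Int)) (n_nodes : Int) : Bool :=
  let visited : List Int := PySem.Set.ofList [0]
  let visited := pvDfs edges (pvFuel edges) visited 0
  decide ((visited.length : Int) = n_nodes)

-- ===== PRECONDITION & SPEC =====
-- A raises KeyError exactly when some node reachable from the depot 0 (including 0
-- itself) is missing from the dict's keys; Pre_ states that domain as an n-step
-- edge-closure of {0} (n = number of entries bounds the length of any shortest
-- path), and additionally requires distinct keys, because a dict with duplicate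
-- keys is not representable in Python and its assoc-list lookup order is a model
-- artefact.
def pvGrowth (edges : List (Int × List Int)) (c : List Int) : List Int :=
  c ++ ((edges.filter (fun p => decide (p.1 ∈ c))).flatMap (fun p => p.2)).filter
    (fun y => decide (y ∉ c))

def pvReachList (edges : List (Int × List Int)) : Nat → List Int
  | 0 => [0]
  | n+1 => pvGrowth edges (pvReachList edges n)

def Pre_check_connectivity_py (edges : List (Int × List Int)) (n_nodes : Int) : Prop :=
  (edges.map Prod.fst).Nodup ∧
  ∀ x ∈ pvReachList edges edges.length, x ∈ edges.map Prod.fst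
instance (edges : List (Int × List Int)) (n_nodes : Int) : Decidable (Pre_check_connectivity_py edges n_nodes) := by unfold Pre_check_connectivity_py; infer_instance

def pvWitness_check_connectivity_py : (List (Int × List Int)) × Int :=
  ([((0 : Int), [(1 : Int)]), (1, [0])], 2)

def Spec_check_connectivity_py (edges : List (Int × List Int)) (n_nodes : Int) (out : Bool) : Prop := out = check_connectivity_py_alt edges n_nodes
instance (edges : List (Int × List Int)) (n_nodes : Int) (out : Bool) : Decidable (Spec_check_connectivity_py edges n_nodes out) := by unfold Spec_check_connectivity_py; infer_instance

-- ===== CLAIM (what is proved, stated in full; the proofs are below) =====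
def Claim_equal_check_connectivity_py : Prop := ∀ (edges : List (Int × List Int)) (n_nodes : Int), Dom_check_connectivity_py edges n_nodes → Pre_check_connectivity_py edges n_nodes → Spec_check_connectivity_py edges n_nodes (check_connectivity_py edges n_nodes)


-- ===== LEMMAS AND PROOFS =====

-- the edge relation of the graph and reachability from the depot 0
def pvStep (edges : List (Int × List Int)) (x y : Int) : Prop :=
  ∃ p ∈ edges, p.1 = x ∧ y ∈ p.2
def pvReach (edges : List (Int × List Int)) (x : Int) : Prop :=
  Relation.ReflTransGen (pvStep edges) 0 x
-- universe: every node either visited set can ever contain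
def pvU (edges : List (Int × List Int)) : List Int :=
  0 :: edges.flatMap (fun p => p.2)

lemma pvLookup_step {edges : List (Int × List Int)} {x y : Int}
    (h : y ∈ pvLookup edges x) : pvStep edges x y := by
  unfold pvLookup at h
  cases hf : edges.find? (fun p => p.1 == x) with
  | none => rw [hf] at h; simp at h
  | some p =>
      rw [hf] at h; simp at h
      have hmem := List.mem_of_find?_eq_some hf
      have hkey := List.find?_some hf
      simp at hkey
      exact ⟨p, hmem, hkey, h⟩

lemma pvStep_lookup {edges : List (Int × List Int)} {x y : Int}
    (hnd : (edges.map Prod.fst).Nodup) (h : pvStep edges x y) : y ∈ pvLookup edges x := by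
  obtain ⟨p, hp, hx, hy⟩ := h
  cases hf : edges.find? (fun q => q.1 == x) with
  | none =>
      have := List.find?_eq_none.mp hf p hp
      simp [hx] at this
  | some q =>
      have hqmem := List.mem_of_find?_eq_some hf
      have hqkey := List.find?_some hf
      simp at hqkey
      have : q = p := List.inj_on_of_nodup_map hnd hqmem hp (by rw [hqkey, hx])
      subst this
      simp [pvLookup, hf, hy]

lemma pvLookup_flat {edges : List (Int × List Int)} {x y : Int}
    (h : y ∈ pvLookup edges x) : y ∈ edges.flatMap (fun p => p.2) := by
  obtain ⟨p, hp, _, hy⟩ := pvLookup_step h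
  exact List.mem_flatMap.mpr ⟨p, hp, hy⟩

lemma pvReach_mem_of_closed (edges : List (Int × List Int)) (V : List Int)
    (h0 : 0 ∈ V) (hc : ∀ x ∈ V, ∀ y, pvStep edges x y → y ∈ V) :
    ∀ x, pvReach edges x → x ∈ V := by
  intro x hx
  induction hx with
  | refl => exact h0
  | tail _ hstep ih => exact hc _ ih _ hstep

lemma pvNodup_length_le (l U : List Int) (hnd : l.Nodup) (hsub : ∀ x ∈ l, x ∈ U) :
    l.length ≤ U.dedup.length := by
  have h1 : l.toFinset ⊆ U.toFinset := by
    intro a ha; rw [List.mem_toFinset] at *; exact hsub a ha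
  have := Finset.card_le_card h1
  rwa [List.toFinset_card_of_nodup hnd, List.card_toFinset] at this

lemma pvBfsStep_spec (nbrs : List Int) : ∀ (vis q : List Int), vis.Nodup →
    (pvBfsStep (vis, q) nbrs).1.Nodup ∧
    (∀ x, x ∈ (pvBfsStep (vis, q) nbrs).1 ↔ x ∈ vis ∨ x ∈ nbrs) ∧
    (∀ x ∈ (pvBfsStep (vis, q) nbrs).2, x ∈ q ∨ x ∈ nbrs) ∧
    (∀ x ∈ q, x ∈ (pvBfsStep (vis, q) nbrs).2) ∧
    (∀ x ∈ (pvBfsStep (vis, q) nbrs).1, x ∉ vis → x ∈ (pvBfsStep (vis, q) nbrs).2) ∧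
    (pvBfsStep (vis, q) nbrs).2.length + vis.length = q.length + (pvBfsStep (vis, q) nbrs).1.length := by
  induction nbrs with
  | nil =>
      intro vis q hnd
      refine ⟨hnd, ?_, ?_, ?_, ?_, ?_⟩
      · intro x; simp [pvBfsStep]
      · intro x hx; simp [pvBfsStep] at hx ⊢; exact hx
      · intro x hx; simpa [pvBfsStep] using hx
      · intro x hx hxv; simp [pvBfsStep] at hx; exact absurd hx hxv
      · simp [pvBfsStep]
  | cons nb t ih =>
      intro vis q hnd
      by_cases hmem : nb ∈ vis
      · have heq : pvBfsStep (vis, q) (nb :: t) = pvBfsStep (vis, q) t := by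
          unfold pvBfsStep; rw [List.foldl_cons]; simp [hmem]
        rw [heq]
        obtain ⟨h1, h2, h3, h4, h5, h6⟩ := ih vis q hnd
        refine ⟨h1, ?_, ?_, h4, h5, h6⟩
        · intro x
          rw [h2]
          constructor
          · rintro (h | h)
            · exact Or.inl h
            · exact Or.inr (List.mem_cons_of_mem _ h)
          · rintro (h | h)
            · exact Or.inl h
            · rcases List.mem_cons.mp h with rfl | h
              · exact Or.inl hmem
              · exact Or.inr h
        · intro x hx
          rcases h3 x hx with h | h
          · exact Or.inl h
          · exact Or.inr (List.mem_cons_of_mem _ h)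
      · have hadd : PySem.Set.add vis nb = vis ++ [nb] := PySem.Set.add_of_not_mem hmem
        have heq : pvBfsStep (vis, q) (nb :: t) = pvBfsStep (vis ++ [nb], q ++ [nb]) t := by
          unfold pvBfsStep; rw [List.foldl_cons]; simp [hmem]
        rw [heq]
        have hnd' : (vis ++ [nb]).Nodup := by
          simp [List.nodup_append, hnd]
          intro a ha hae; subst hae; exact hmem ha
        obtain ⟨h1, h2, h3, h4, h5, h6⟩ := ih (vis ++ [nb]) (q ++ [nb]) hnd'
        refine ⟨h1, ?_, ?_, ?_, ?_, ?_⟩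
        · intro x
          rw [h2]
          simp [List.mem_append, List.mem_cons]
          tauto
        · intro x hx
          rcases h3 x hx with h | h
          · rcases List.mem_append.mp h with h | h
            · exact Or.inl h
            · simp at h; subst h; exact Or.inr List.mem_cons_self
          · exact Or.inr (List.mem_cons_of_mem _ h)
        · intro x hx
          exact h4 x (List.mem_append_left _ hx)
        · intro x hx hxv
          by_cases hxe : x = nb
          · subst hxe
            exact h4 x (by simp)
          · apply h5 x hx
            simp [List.mem_append, hxe]
            exact hxv
        · simp at h6
          omega

lemma pvBfs_main (edges : List (Int × List Int)) (hnd : (edges.map Prod.fst).Nodup) :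
    ∀ (fuel : Nat) (vis queue : List Int),
    vis.Nodup →
    0 ∈ vis →
    (∀ x ∈ queue, x ∈ vis) →
    (∀ x ∈ vis, pvReach edges x) →
    (∀ x ∈ vis, x ∉ queue → ∀ y, pvStep edges x y → y ∈ vis) →
    (∀ x ∈ vis, x ∈ pvU edges) →
    queue.length + (pvU edges).dedup.length ≤ fuel + vis.length →
    (pvBfsGo edges fuel vis queue).Nodup ∧
    (∀ x, x ∈ pvBfsGo edges fuel vis queue ↔ pvReach edges x) := by
  intro fuel
  induction fuel with
  | zero =>
      intro vis queue hvnd h0 hqv hreach hsemi hU hfuel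
      have hle := pvNodup_length_le vis (pvU edges) hvnd hU
      have hq : queue = [] := by
        cases queue with
        | nil => rfl
        | cons a q => simp at hfuel; omega
      subst hq
      have hclosed : ∀ x ∈ vis, ∀ y, pvStep edges x y → y ∈ vis := by
        intro x hx y hy
        exact hsemi x hx (by simp) y hy
      exact ⟨hvnd, fun x => ⟨fun hx => hreach x hx,
        fun hx => pvReach_mem_of_closed edges vis h0 hclosed x hx⟩⟩
  | succ fuel ih =>
      intro vis queue hvnd h0 hqv hreach hsemi hU hfuel
      cases queue with
      | nil =>
          have hclosed : ∀ x ∈ vis, ∀ y, pvStep edges x y → y ∈ vis := by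
            intro x hx y hy
            exact hsemi x hx (by simp) y hy
          exact ⟨hvnd, fun x => ⟨fun hx => hreach x hx,
            fun hx => pvReach_mem_of_closed edges vis h0 hclosed x hx⟩⟩
      | cons node q =>
          obtain ⟨s1nd, s2mem, sqmem, sqsub, snew, slen⟩ :=
            pvBfsStep_spec (pvLookup edges node) vis q hvnd
          have hgo : pvBfsGo edges (fuel+1) vis (node :: q) =
              pvBfsGo edges fuel (pvBfsStep (vis, q) (pvLookup edges node)).1
                (pvBfsStep (vis, q) (pvLookup edges node)).2 := rfl
          rw [hgo]
          have hnodev : node ∈ vis := hqv node List.mem_cons_self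
          apply ih _ _ s1nd
          · exact (s2mem 0).mpr (Or.inl h0)
          · intro x hx
            rcases sqmem x hx with h | h
            · exact (s2mem x).mpr (Or.inl (hqv x (List.mem_cons_of_mem _ h)))
            · exact (s2mem x).mpr (Or.inr h)
          · intro x hx
            rcases (s2mem x).mp hx with h | h
            · exact hreach x h
            · exact Relation.ReflTransGen.tail (hreach node hnodev) (pvLookup_step h)
          · intro x hx hxr2 y hy
            have hxvis : x ∈ vis := by
              by_contra hxv
              exact hxr2 (snew x hx hxv)
            by_cases hxn : x = node
            · subst hxn
              exact (s2mem y).mpr (Or.inr (pvStep_lookup hnd hy))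
            · have hxq : x ∉ node :: q := by
                intro hmem
                rcases List.mem_cons.mp hmem with h | h
                · exact hxn h
                · exact hxr2 (sqsub x h)
              exact (s2mem y).mpr (Or.inl (hsemi x hxvis hxq y hy))
          · intro x hx
            rcases (s2mem x).mp hx with h | h
            · exact hU x h
            · exact List.mem_cons_of_mem _ (pvLookup_flat h)
          · simp at hfuel
            omega

-- B-side: the recursive DFS visits exactly the reachable set
lemma pvSubset_length_le (l m : List Int) (hl : l.Nodup) (hm : m.Nodup)
    (hsub : ∀ x ∈ l, x ∈ m) : l.length ≤ m.length := by
  have := pvNodup_length_le l m hl hsub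
  rwa [List.Nodup.dedup hm] at this

lemma pvDfs_main (edges : List (Int × List Int)) :
    ∀ (fuel : Nat) (vis : List Int) (node : Int),
    vis.Nodup → 0 ∈ vis → node ∈ vis →
    (∀ x ∈ vis, pvReach edges x) →
    (∀ x ∈ vis, x ∈ pvU edges) →
    pvFuel edges + 1 ≤ fuel + vis.length →
    (pvDfs edges fuel vis node).Nodup ∧
    (∀ x ∈ vis, x ∈ pvDfs edges fuel vis node) ∧
    (∀ x ∈ pvDfs edges fuel vis node, x ∈ vis ∨ x ∈ edges.flatMap (fun p => p.2)) ∧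
    (∀ x ∈ pvDfs edges fuel vis node, pvReach edges x) ∧
    (∀ y ∈ pvLookup edges node, y ∈ pvDfs edges fuel vis node) ∧
    (∀ x ∈ pvDfs edges fuel vis node, x ∉ vis → ∀ y ∈ pvLookup edges x, y ∈ pvDfs edges fuel vis node) := by
  intro fuel
  induction fuel with
  | zero =>
      intro vis node hvnd h0 hnode hreach hU hfuel
      exfalso
      have hle := pvNodup_length_le vis (pvU edges) hvnd hU
      have hDle : (pvU edges).dedup.length ≤ (pvU edges).length :=
        List.Sublist.length_le (List.dedup_sublist _)
      have hUlen : (pvU edges).length = pvFuel edges := by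
        simp [pvU, pvFuel]
      omega
  | succ fuel ih =>
      intro vis node hvnd h0 hnode hreach hU hfuel
      have hQ : ∀ (nbrs : List Int), (∀ y ∈ nbrs, y ∈ pvLookup edges node) →
          ∀ (vis' : List Int), vis'.Nodup → 0 ∈ vis' → node ∈ vis' →
          (∀ x ∈ vis, x ∈ vis') →
          (∀ x ∈ vis', pvReach edges x) →
          (∀ x ∈ vis', x ∈ vis ∨ x ∈ edges.flatMap (fun p => p.2)) →
          (∀ x ∈ vis', x ∉ vis → ∀ y ∈ pvLookup edges x, y ∈ vis') →
          pvFuel edges + 1 ≤ (fuel + 1) + vis'.length →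
          (nbrs.foldl (fun vis nb => if PySem.Set.contains vis nb then vis
              else pvDfs edges fuel (PySem.Set.add vis nb) nb) vis').Nodup ∧
          (∀ x ∈ vis', x ∈ nbrs.foldl (fun vis nb => if PySem.Set.contains vis nb then vis
              else pvDfs edges fuel (PySem.Set.add vis nb) nb) vis') ∧
          (∀ x ∈ nbrs.foldl (fun vis nb => if PySem.Set.contains vis nb then vis
              else pvDfs edges fuel (PySem.Set.add vis nb) nb) vis',
            x ∈ vis ∨ x ∈ edges.flatMap (fun p => p.2)) ∧
          (∀ x ∈ nbrs.foldl (fun vis nb => if PySem.Set.contains vis nb then vis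
              else pvDfs edges fuel (PySem.Set.add vis nb) nb) vis', pvReach edges x) ∧
          (∀ y ∈ nbrs, y ∈ nbrs.foldl (fun vis nb => if PySem.Set.contains vis nb then vis
              else pvDfs edges fuel (PySem.Set.add vis nb) nb) vis') ∧
          (∀ x ∈ nbrs.foldl (fun vis nb => if PySem.Set.contains vis nb then vis
              else pvDfs edges fuel (PySem.Set.add vis nb) nb) vis', x ∉ vis →
            ∀ y ∈ pvLookup edges x, y ∈ nbrs.foldl (fun vis nb => if PySem.Set.contains vis nb then vis
              else pvDfs edges fuel (PySem.Set.add vis nb) nb) vis') := by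
        intro nbrs
        induction nbrs with
        | nil =>
            intro _ vis' hnd' h0' hnode' hmono hreach' hUor hInv _
            refine ⟨hnd', ?_, hUor, hreach', ?_, hInv⟩
            · intro x hx; simpa using hx
            · intro y hy; simp at hy
        | cons nb t iht =>
            intro hsub vis' hnd' h0' hnode' hmono hreach' hUor hInv hf
            have htsub : ∀ y ∈ t, y ∈ pvLookup edges node :=
              fun y hy => hsub y (List.mem_cons_of_mem _ hy)
            by_cases hc : nb ∈ vis'
            · have heq : (nb :: t).foldl (fun vis nb => if PySem.Set.contains vis nb then vis
                  else pvDfs edges fuel (PySem.Set.add vis nb) nb) vis'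
                  = t.foldl (fun vis nb => if PySem.Set.contains vis nb then vis
                  else pvDfs edges fuel (PySem.Set.add vis nb) nb) vis' := by
                rw [List.foldl_cons]; simp [hc]
              rw [heq]
              obtain ⟨q1, q2, q3, q4, q5, q6⟩ :=
                iht htsub vis' hnd' h0' hnode' hmono hreach' hUor hInv hf
              refine ⟨q1, q2, q3, q4, ?_, q6⟩
              intro y hy
              rcases List.mem_cons.mp hy with rfl | hy'
              · exact q2 y hc
              · exact q5 y hy'
            · have heq : (nb :: t).foldl (fun vis nb => if PySem.Set.contains vis nb then vis
                  else pvDfs edges fuel (PySem.Set.add vis nb) nb) vis'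
                  = t.foldl (fun vis nb => if PySem.Set.contains vis nb then vis
                  else pvDfs edges fuel (PySem.Set.add vis nb) nb)
                    (pvDfs edges fuel (vis' ++ [nb]) nb) := by
                rw [List.foldl_cons]; simp [hc]
              rw [heq]
              have hnb_look : nb ∈ pvLookup edges node := hsub nb List.mem_cons_self
              have hreach_nb : pvReach edges nb :=
                Relation.ReflTransGen.tail (hreach' node hnode') (pvLookup_step hnb_look)
              have hflat_nb : nb ∈ edges.flatMap (fun p => p.2) := pvLookup_flat hnb_look
              have hnd'' : (vis' ++ [nb]).Nodup := by
                simp [List.nodup_append, hnd']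
                intro a ha hae; subst hae; exact hc ha
              obtain ⟨d1, d2, d3, d4, d5, d6⟩ := ih (vis' ++ [nb]) nb hnd''
                (List.mem_append_left _ h0') (List.mem_append_right _ (by simp))
                (by intro x hx
                    rcases List.mem_append.mp hx with h | h
                    · exact hreach' x h
                    · simp at h; subst h; exact hreach_nb)
                (by intro x hx
                    rcases List.mem_append.mp hx with h | h
                    · rcases hUor x h with h' | h'
                      · exact hU x h'
                      · exact List.mem_cons_of_mem _ h'
                    · simp at h; subst h; exact List.mem_cons_of_mem _ hflat_nb)
                (by simp; omega)
              have hmono' : ∀ x ∈ vis', x ∈ pvDfs edges fuel (vis' ++ [nb]) nb :=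
                fun x hx => d2 x (List.mem_append_left _ hx)
              have hlen' : vis'.length ≤ (pvDfs edges fuel (vis' ++ [nb]) nb).length :=
                pvSubset_length_le vis' _ hnd' d1 hmono'
              obtain ⟨q1, q2, q3, q4, q5, q6⟩ := iht htsub (pvDfs edges fuel (vis' ++ [nb]) nb)
                d1 (hmono' 0 h0') (hmono' node hnode')
                (fun x hx => hmono' x (hmono x hx))
                d4
                (by intro x hx
                    rcases d3 x hx with h | h
                    · rcases List.mem_append.mp h with h' | h'
                      · exact hUor x h'
                      · simp at h'; subst h'; exact Or.inr hflat_nb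
                    · exact Or.inr h)
                (by intro x hx hxv y hy
                    by_cases hx' : x ∈ vis' ++ [nb]
                    · rcases List.mem_append.mp hx' with h | h
                      · exact hmono' y (hInv x h hxv y hy)
                      · simp at h; subst h; exact d5 y hy
                    · exact d6 x hx hx' y hy)
                (by omega)
              refine ⟨q1, ?_, q3, q4, ?_, q6⟩
              · intro x hx; exact q2 x (hmono' x hx)
              · intro y hy
                rcases List.mem_cons.mp hy with rfl | hy'
                · exact q2 y (d2 y (List.mem_append_right _ (by simp)))
                · exact q5 y hy'
      have hgo : pvDfs edges (fuel+1) vis node =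
          (pvLookup edges node).foldl
            (fun vis nb => if PySem.Set.contains vis nb then vis
              else pvDfs edges fuel (PySem.Set.add vis nb) nb) vis := rfl
      rw [hgo]
      exact hQ (pvLookup edges node) (fun y hy => hy) vis hvnd h0 hnode
        (fun x hx => hx) hreach (fun x hx => Or.inl hx)
        (fun x hx hxv => absurd hx hxv) hfuel


-- ===== VERDICT (by name: the statement is the Claim_ definition above) =====
theorem check_connectivity_py_spec : Claim_equal_check_connectivity_py := by
  intro edges n_nodes _ hpre
  obtain ⟨hnd, -⟩ := hpre
  have hDle : (pvU edges).dedup.length ≤ (pvU edges).length :=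
    List.Sublist.length_le (List.dedup_sublist _)
  have hUlen : (pvU edges).length = pvFuel edges := by
    simp [pvU, pvFuel]
  have hA := pvBfs_main edges hnd (pvFuel edges) [0] [0]
    (by simp) (by simp) (by simp)
    (by intro x hx; simp at hx; subst hx; exact Relation.ReflTransGen.refl)
    (by intro x hx hq; simp at hx; exact absurd (by simp [hx]) hq)
    (by intro x hx; simp at hx; subst hx; exact List.mem_cons_self)
    (by simp; omega)
  obtain ⟨d1, d2, d3, d4, d5, d6⟩ := pvDfs_main edges (pvFuel edges) [0] 0
    (by simp) (by simp) (by simp)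
    (by intro x hx; simp at hx; subst hx; exact Relation.ReflTransGen.refl)
    (by intro x hx; simp at hx; subst hx; exact List.mem_cons_self)
    (by simp)
  -- B's DFS result is closed under the edge relation, hence contains the reachable set
  have hclosed : ∀ x ∈ pvDfs edges (pvFuel edges) [0] 0, ∀ y, pvStep edges x y →
      y ∈ pvDfs edges (pvFuel edges) [0] 0 := by
    intro x hx y hy
    by_cases hx0 : x ∈ ([0] : List Int)
    · simp at hx0; subst hx0
      exact d5 y (pvStep_lookup hnd hy)
    · exact d6 x hx hx0 y (pvStep_lookup hnd hy)
  have hBmem : ∀ x, x ∈ pvDfs edges (pvFuel edges) [0] 0 ↔ pvReach edges x :=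
    fun x => ⟨fun hx => d4 x hx,
      fun hx => pvReach_mem_of_closed edges _ (d2 0 (by simp)) hclosed x hx⟩
  have hperm : (pvBfsGo edges (pvFuel edges) [0] [0]).Perm (pvDfs edges (pvFuel edges) [0] 0) :=
    (List.perm_ext_iff_of_nodup hA.1 d1).mpr (fun a => (hA.2 a).trans ((hBmem a)).symm)
  have hlen := hperm.length_eq
  have hinit : (PySem.Set.add (PySem.Set.empty) (0 : Int)) = [0] := rfl
  have hinit2 : (PySem.Set.ofList [(0 : Int)]) = [0] := rfl
  unfold Spec_check_connectivity_py check_connectivity_py check_connectivity_py_alt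
  simp only [hinit, hinit2]
  rw [hlen]
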